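-- pv_equiv track=rewrite | github.com/htrc/htrc-feature-reader | htrc_features/utils.py | extract_htid
-- ===== SOURCE A (Python) =====
-- def _id_decode(id):
--     '''
--     :param id: A sanitized Pairtree ID.
--     :return: An original Pairtree ID.
--     '''
--     return id.replace("+", ":").replace("=", "/").replace(",", ".")
--
-- def extract_htid(filename):
--     """
--     Inverse of clean_htid, that also strips file suffixes
--     """
--     def trim(string, suffix):
--         if string.endswith(suffix):
--             return string[:-len(suffix)]
--         return string
--
--     for suffix in [".gz", ".bz2"]:
--         filename = trim(filename, suffix)
--     for suffix in [".json", ".parquet"]: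
--         filename = trim(filename, suffix)
--     for suffix in [".meta", ".tokens", ".chars", ".section"]:
--         filename = trim(filename, suffix)
--
--     return _id_decode(filename)
-- ===== SOURCE B (Python) =====
-- def extract_htid(filename):
--     """
--     Inverse of clean_htid, that also strips file suffixes
--     """
--     parts = filename.split('.')
--     for word in ('gz', 'bz2', 'json', 'parquet',
--                  'meta', 'tokens', 'chars', 'section'):
--         if len(parts) > 1 and parts[-1] == word:
--             parts.pop()
--     return '.'.join(parts).translate(str.maketrans('+=,', ':/.'))
-- ===== Notes on version B (the rewrite author's own statement) =====
-- stated objective: idiomatic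
-- what changed: B splits the filename on the dot separator once and conditionally pops the last component for each known extension instead of A's three endswith/negative-slice trimming loops, and replaces A's three sequential str.replace passes by a single per-character translate table.
import Mathlib
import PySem

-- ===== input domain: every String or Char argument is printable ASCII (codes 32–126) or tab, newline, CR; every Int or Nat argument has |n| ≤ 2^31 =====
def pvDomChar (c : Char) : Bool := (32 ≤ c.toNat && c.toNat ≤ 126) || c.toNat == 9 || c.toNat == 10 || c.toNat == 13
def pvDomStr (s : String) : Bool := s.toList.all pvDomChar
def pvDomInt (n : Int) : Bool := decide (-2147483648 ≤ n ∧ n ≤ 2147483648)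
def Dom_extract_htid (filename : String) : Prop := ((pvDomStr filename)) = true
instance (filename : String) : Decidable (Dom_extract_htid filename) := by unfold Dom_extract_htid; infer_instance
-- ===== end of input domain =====

-- B replaces A's three endswith/slice trimming loops by one split('.') pass with
-- conditional pops of the last component, and A's three replace passes by a single
-- per-character translation (objective: simpler/idiomatic, same cost).

-- ===== PORT A =====
def pvTrim (s suffix : String) : String :=
  if PySem.Str.endswith s suffix then
    PySem.Str.slice s none (some (-(PySem.Str.len suffix : Int)))
  else s

def pvIdDecode (s : String) : String :=
  PySem.Str.replace (PySem.Str.replace (PySem.Str.replace s "+" ":") "=" "/") "," "."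

def extract_htid (filename : String) : String :=
  let f1 := [".gz", ".bz2"].foldl pvTrim filename
  let f2 := [".json", ".parquet"].foldl pvTrim f1
  let f3 := [".meta", ".tokens", ".chars", ".section"].foldl pvTrim f2
  pvIdDecode f3

-- ===== PORT B =====
-- port of str.translate(str.maketrans('+=,', ':/.')): a 1-char-to-1-char table, i.e. a per-character map (exact)
def pvTable (c : Char) : Char :=
  if c == '+' then ':' else if c == '=' then '/' else if c == ',' then '.' else c

def pvStep (parts : List String) (word : String) : List String :=
  if parts.length > 1 && (PySem.List.pyGet? parts (-1) == some word) then parts.dropLast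
  else parts

def extract_htid_alt (filename : String) : String :=
  -- filename.split('.'): the separator "." is a nonempty literal, so split? is `some`
  let parts := (PySem.Str.split? filename ".").getD []
  let parts := ["gz", "bz2", "json", "parquet", "meta", "tokens", "chars", "section"].foldl pvStep parts
  String.ofList ((PySem.Str.join "." parts).toList.map pvTable)

-- ===== PRECONDITION & SPEC =====
def Spec_extract_htid (filename : String) (out : String) : Prop := out = extract_htid_alt filename
instance (filename : String) (out : String) : Decidable (Spec_extract_htid filename out) := by unfold Spec_extract_htid; infer_instance

-- ===== CLAIM (what is proved, stated in full; the proofs are below) =====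
def Claim_equal_extract_htid : Prop := ∀ (filename : String), Dom_extract_htid filename → Spec_extract_htid filename (extract_htid filename)

-- ===== LEMMAS AND PROOFS =====

-- the B-side loop step, on lists of characters
def charStep (qs : List (List Char)) (w : List Char) : List (List Char) :=
  if qs.length > 1 && (qs.getLast? == some w) then qs.dropLast else qs

-- split on '.' : the fuel-based PySem loop equals List.splitOnP
lemma splitOn_go_eq (l cur : List Char) (acc : List (List Char)) (fuel : Nat) (h : l.length ≤ fuel) :
    PySem.Chars.splitOn.go ['.'] fuel l cur acc
      = acc.reverse ++ (List.splitOnP (· == '.') l).modifyHead (cur.reverse ++ ·) := by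
  induction l generalizing fuel cur acc with
  | nil =>
    cases fuel with
    | zero => rw [PySem.Chars.splitOn.go]; simp [List.splitOnP_nil]
    | succ f => rw [PySem.Chars.splitOn.go] <;> simp [List.splitOnP_nil]
  | cons c t ih =>
    cases fuel with
    | zero => simp at h
    | succ f =>
      have ht : t.length ≤ f := by simpa using h
      obtain ⟨q, qs, hq⟩ := List.exists_cons_of_ne_nil (List.splitOnP_ne_nil (· == '.') t)
      rw [PySem.Chars.splitOn.go]
      by_cases hc : c = '.'
      · subst hc
        have hpre : ['.'].isPrefixOf ('.'::t) = true := by simp [List.isPrefixOf]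
        rw [if_pos hpre]
        have : List.drop (['.']).length ('.'::t) = t := by simp
        rw [this, ih _ _ _ ht]
        simp [List.splitOnP_cons, hq, List.modifyHead]
      · have hpre : ['.'].isPrefixOf (c::t) = false := by
          simp [List.isPrefixOf]; exact fun hh => (hc hh.symm).elim
        rw [if_neg (by simp [hpre]), ih _ _ _ ht]
        simp [List.splitOnP_cons, hq, hc, List.modifyHead]

lemma splitOn_eq (cs : List Char) :
    PySem.Chars.splitOn cs ['.'] = List.splitOnP (· == '.') cs := by
  unfold PySem.Chars.splitOn
  rw [splitOn_go_eq _ _ _ _ (Nat.le_succ _)]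
  obtain ⟨q, qs, hq⟩ := List.exists_cons_of_ne_nil (List.splitOnP_ne_nil (· == '.') cs)
  simp [hq, List.modifyHead]

lemma sp_dotfree (cs : List Char) :
    ∀ q ∈ List.splitOnP (fun c => c == '.') cs, '.' ∉ q := by
  induction cs with
  | nil => simp [List.splitOnP_nil]
  | cons c t ih =>
    rw [List.splitOnP_cons]
    by_cases hc : c = '.'
    · subst hc; simp; exact ih
    · obtain ⟨q0, qs, hq⟩ := List.exists_cons_of_ne_nil (List.splitOnP_ne_nil (fun c => c == '.') t)
      rw [hq]
      simp [hc, List.modifyHead]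
      refine ⟨⟨fun hh => hc hh.symm, ?_⟩, ?_⟩
      · exact ih q0 (by simp [hq])
      · exact fun q hmem => ih q (by simp [hq, hmem])

lemma join_sp (cs : List Char) :
    PySem.Chars.join ['.'] (List.splitOnP (fun c => c == '.') cs) = cs := by
  have h := List.intercalate_splitOn cs '.'
  rw [List.splitOn] at h
  simpa [PySem.Chars.join] using h

-- single-character replace is a map
lemma replace_go_eq (o n : Char) (l acc : List Char) (fuel : Nat) (h : l.length ≤ fuel) :
    PySem.Chars.replace.go [o] [n] fuel l acc
      = acc.reverse ++ l.map (fun c => if c == o then n else c) := by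
  induction l generalizing fuel acc with
  | nil =>
    cases fuel with
    | zero => rw [PySem.Chars.replace.go]; simp
    | succ f => rw [PySem.Chars.replace.go] <;> simp
  | cons c t ih =>
    cases fuel with
    | zero => simp at h
    | succ f =>
      have ht : t.length ≤ f := by simpa using h
      rw [PySem.Chars.replace.go]
      by_cases hc : c = o
      · subst hc
        have hpre : [c].isPrefixOf (c::t) = true := by simp [List.isPrefixOf]
        rw [if_pos hpre]
        have h1 : List.drop ([c]).length (c::t) = t := by simp
        rw [h1, ih _ _ ht]
        simp
      · have hpre : [o].isPrefixOf (c::t) = false := by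
          simp [List.isPrefixOf]; exact fun hh => (hc hh.symm).elim
        rw [if_neg (by simp [hpre]), ih _ _ ht]
        simp [hc]

lemma replace_single (o n : Char) (s : List Char) :
    PySem.Chars.replace s [o] [n] = s.map (fun c => if c == o then n else c) := by
  unfold PySem.Chars.replace
  rw [if_neg (by simp)]
  rw [replace_go_eq _ _ _ _ _ (le_refl _)]
  simp

lemma pyGet?_neg_one {α : Type} (xs : List α) : PySem.List.pyGet? xs (-1) = xs.getLast? := by
  cases xs with
  | nil => simp [PySem.List.pyGet?, PySem.List.pyIdx?]
  | cons a l =>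
    have h1 : ¬ ((0:Int) ≤ -1) := by norm_num
    have h2 : (-(((a::l).length : Nat) : Int) ≤ -1) := by
      simp only [List.length_cons]; push_cast; omega
    simp only [PySem.List.pyGet?, PySem.List.pyIdx?, if_neg h1, if_pos h2]
    simp [List.getLast?_eq_getElem?]

lemma join_concat (qs : List (List Char)) (l : List Char) (h : qs ≠ []) :
    PySem.Chars.join ['.'] (qs ++ [l]) = PySem.Chars.join ['.'] qs ++ '.' :: l := by
  induction qs with
  | nil => contradiction
  | cons q rest ih =>
    cases rest with
    | nil =>
      rw [show ([q] ++ [l]) = [q, l] from rfl, PySem.Chars.join_cons_cons,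
        PySem.Chars.join_singleton, PySem.Chars.join_singleton]
      simp
    | cons r rs =>
      rw [show ((q :: r :: rs) ++ [l]) = q :: ((r :: rs) ++ [l]) from rfl]
      rw [show (q :: ((r :: rs) ++ [l])) = q :: r :: (rs ++ [l]) from rfl]
      rw [PySem.Chars.join_cons_cons, PySem.Chars.join_cons_cons]
      rw [show (r :: (rs ++ [l])) = ((r :: rs) ++ [l]) from rfl]
      rw [ih (by simp)]
      simp

lemma prefix_dotfree (rl : List Char) (rw rest : List Char) (hw : '.' ∉ rw) (hl : '.' ∉ rl) :
    ((rw ++ ['.']) <+: (rl ++ '.' :: rest)) ↔ rw = rl := by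
  induction rl generalizing rw with
  | nil =>
    cases rw with
    | nil => simp
    | cons a u =>
      simp only [List.cons_append, List.nil_append, List.cons_prefix_cons]
      constructor
      · rintro ⟨rfl, -⟩; exact absurd (List.mem_cons_self) hw
      · intro hh; exact absurd hh (by simp)
  | cons b rl' ih =>
    cases rw with
    | nil =>
      simp only [List.nil_append, List.cons_append, List.cons_prefix_cons]
      constructor
      · rintro ⟨rfl, -⟩; exact absurd (List.mem_cons_self) hl
      · intro hh; exact absurd hh (by simp)
    | cons a u =>
      simp only [List.cons_append, List.cons_prefix_cons]
      have hw' : '.' ∉ u := fun hm => hw (List.mem_cons_of_mem _ hm)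
      have hl' : '.' ∉ rl' := fun hm => hl (List.mem_cons_of_mem _ hm)
      rw [ih u hw' hl']
      constructor
      · rintro ⟨rfl, rfl⟩; rfl
      · intro hh; injection hh with h1 h2; exact ⟨h1, h2⟩

lemma suffix_iff_last (qs : List (List Char)) (w : List Char)
    (hne : qs ≠ []) (hfree : ∀ p ∈ qs, '.' ∉ p) (hw : '.' ∉ w) :
    ('.' :: w) <:+ PySem.Chars.join ['.'] qs ↔ (1 < qs.length ∧ qs.getLast? = some w) := by
  obtain h0 | ⟨qs0, l, rfl⟩ := qs.eq_nil_or_concat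
  · exact absurd h0 hne
  · rw [List.concat_eq_append] at *
    cases qs0 with
    | nil =>
      rw [List.nil_append, PySem.Chars.join_singleton]
      constructor
      · intro h
        exact absurd (h.subset List.mem_cons_self) (hfree l (by simp))
      · rintro ⟨h1, -⟩; simp at h1
    | cons q0 qr =>
      rw [join_concat _ _ (by simp)]
      rw [← List.reverse_prefix]
      have hrw : ('.'::w).reverse = w.reverse ++ ['.'] := by simp
      have hrs : (PySem.Chars.join ['.'] (q0::qr) ++ '.' :: l).reverse
          = l.reverse ++ '.' :: (PySem.Chars.join ['.'] (q0::qr)).reverse := by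
        simp
      rw [hrw, hrs]
      have hl : '.' ∉ l.reverse := by
        rw [List.mem_reverse]; exact hfree l (by simp)
      have hwr : '.' ∉ w.reverse := by rwa [List.mem_reverse]
      rw [prefix_dotfree _ _ _ hwr hl, List.reverse_inj]
      rw [List.getLast?_concat]
      constructor
      · rintro rfl; exact ⟨by simp, rfl⟩
      · rintro ⟨-, h2⟩; injection h2 with h2; exact h2.symm

lemma slice_neg_stop {α : Type} (xs : List α) (k : Nat) (hk : 0 < k) (h : k ≤ xs.length) :
    PySem.List.slice xs none (some (-(k : Int))) = xs.take (xs.length - k) := by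
  unfold PySem.List.slice PySem.List.clampIdx
  have h1 : (-(k:Int)) < 0 := by omega
  have h2 : ¬ ((xs.length : Int) + -(k:Int) < 0) := by omega
  simp only [if_pos h1, if_neg h2]
  have h3 : ((xs.length : Int) + -(k:Int)).toNat = xs.length - k := by omega
  simp [h3]

-- one trimming step of A equals one pop step of B, through join
lemma step_rel (qs : List (List Char)) (w : List Char)
    (hne : qs ≠ []) (hfree : ∀ p ∈ qs, '.' ∉ p) (hw : '.' ∉ w) :
    pvTrim (String.ofList (PySem.Chars.join ['.'] qs)) (String.ofList ('.' :: w))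
      = String.ofList (PySem.Chars.join ['.'] (charStep qs w)) := by
  unfold pvTrim charStep
  have hcond : (PySem.Str.endswith (String.ofList (PySem.Chars.join ['.'] qs)) (String.ofList ('.' :: w)) = true)
      ↔ (qs.length > 1 && (qs.getLast? == some w)) = true := by
    rw [PySem.Str.endswith_eq, String.toList_ofList, String.toList_ofList,
      PySem.Chars.endswith_iff, suffix_iff_last qs w hne hfree hw]
    simp
  by_cases h : (qs.length > 1 && (qs.getLast? == some w)) = true
  · rw [if_pos (hcond.mpr h), if_pos h]
    simp only [Bool.and_eq_true, decide_eq_true_eq, beq_iff_eq] at h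
    obtain ⟨hlen, hlast⟩ := h
    have hql : qs.getLast hne = w := by
      have := List.getLast?_eq_some_getLast (l := qs) hne
      rw [hlast] at this; injection this with this; exact this.symm
    have hdecomp : qs = qs.dropLast ++ [w] := by
      conv_lhs => rw [← List.dropLast_concat_getLast hne]
      rw [hql]
    have hd0 : qs.dropLast ≠ [] := by
      have : qs.dropLast.length = qs.length - 1 := List.length_dropLast
      intro hnil; rw [hnil] at this; simp at this; omega
    rw [← String.toList_inj, PySem.Str.toList_slice, PySem.Chars.slice_eq_listSlice,
      String.toList_ofList, String.toList_ofList]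
    have hlen2 : PySem.Str.len (String.ofList ('.'::w)) = ((w.length + 1 : Nat) : Int) := by
      rw [PySem.Str.len_eq, String.toList_ofList]; simp
    rw [hlen2]
    have hsfx : ('.' :: w) <:+ PySem.Chars.join ['.'] qs :=
      (suffix_iff_last qs w hne hfree hw).mpr ⟨hlen, hlast⟩
    have hle : w.length + 1 ≤ (PySem.Chars.join ['.'] qs).length := by
      have := hsfx.length_le; simpa using this
    rw [slice_neg_stop _ _ (by omega) hle]
    conv_lhs => rw [hdecomp]
    rw [join_concat _ _ hd0]
    have hlen3 : (PySem.Chars.join ['.'] (qs.dropLast) ++ '.' :: w).length - (w.length + 1)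
        = (PySem.Chars.join ['.'] (qs.dropLast)).length := by
      simp only [List.length_append, List.length_cons]
      omega
    rw [hlen3, List.take_left]
  · rw [if_neg (fun hc => h (hcond.mp hc)), if_neg h]

lemma charStep_ne_nil (qs : List (List Char)) (w : List Char) (h : qs ≠ []) : charStep qs w ≠ [] := by
  unfold charStep
  split_ifs with hg
  · simp only [Bool.and_eq_true, decide_eq_true_eq] at hg
    have : qs.dropLast.length = qs.length - 1 := List.length_dropLast
    intro hnil; rw [hnil] at this; simp at this; omega
  · exact h

lemma charStep_dotfree (qs : List (List Char)) (w : List Char) (h : ∀ p ∈ qs, '.' ∉ p) :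
    ∀ p ∈ charStep qs w, '.' ∉ p := by
  unfold charStep
  split_ifs with hg
  · exact fun p hp => h p ((List.dropLast_sublist qs).subset hp)
  · exact h

lemma fold_rel (ws : List (List Char)) : ∀ (qs : List (List Char)),
    (∀ w ∈ ws, '.' ∉ w) → qs ≠ [] → (∀ p ∈ qs, '.' ∉ p) →
    (ws.map (fun w => String.ofList ('.' :: w))).foldl pvTrim (String.ofList (PySem.Chars.join ['.'] qs))
      = String.ofList (PySem.Chars.join ['.'] (ws.foldl charStep qs)) := by
  induction ws with
  | nil => intro qs _ _ _; rfl
  | cons w ws ih =>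
    intro qs hws hne hfree
    simp only [List.map_cons, List.foldl_cons]
    rw [step_rel qs w hne hfree (hws w List.mem_cons_self)]
    exact ih (charStep qs w) (fun v hv => hws v (List.mem_cons_of_mem _ hv))
      (charStep_ne_nil qs w hne) (charStep_dotfree qs w hfree)

lemma stepB_map (qs : List (List Char)) (w : List Char) :
    pvStep (qs.map String.ofList) (String.ofList w) = (charStep qs w).map String.ofList := by
  unfold pvStep charStep
  rw [pyGet?_neg_one, List.getLast?_map, List.length_map]
  have hguard : (Option.map String.ofList qs.getLast? == some (String.ofList w)) = (qs.getLast? == some w) := by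
    cases hq : qs.getLast? with
    | none => simp
    | some a => simp [String.ofList_inj]
  rw [hguard]
  split_ifs with h
  · rw [← List.map_dropLast]
  · rfl

lemma foldB_map (ws : List (List Char)) : ∀ (qs : List (List Char)),
    (ws.map String.ofList).foldl pvStep (qs.map String.ofList)
      = (ws.foldl charStep qs).map String.ofList := by
  induction ws with
  | nil => intro qs; rfl
  | cons w ws ih =>
    intro qs
    simp only [List.map_cons, List.foldl_cons]
    rw [stepB_map, ih]

lemma decode_map (l : List Char) :
    pvIdDecode (String.ofList l) = String.ofList (l.map pvTable) := by
  unfold pvIdDecode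
  rw [← String.toList_inj]
  simp only [PySem.Str.toList_replace, String.toList_ofList]
  have h1 : ("+" : String).toList = ['+'] := by decide
  have h2 : (":" : String).toList = [':'] := by decide
  have h3 : ("=" : String).toList = ['='] := by decide
  have h4 : ("/" : String).toList = ['/'] := by decide
  have h5 : ("," : String).toList = [','] := by decide
  have h6 : ("." : String).toList = ['.'] := by decide
  rw [h1, h2, h3, h4, h5, h6, replace_single, replace_single, replace_single]
  rw [List.map_map, List.map_map]
  apply List.map_congr_left
  intro c _
  simp only [Function.comp]
  unfold pvTable
  by_cases hc1 : c = '+'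
  · subst hc1; decide
  · by_cases hc2 : c = '='
    · subst hc2; decide
    · by_cases hc3 : c = ','
      · subst hc3; decide
      · simp [hc1, hc2, hc3]

lemma parts_init (filename : String) :
    (PySem.Str.split? filename ".").getD []
      = (List.splitOnP (fun c => c == '.') filename.toList).map String.ofList := by
  have h := PySem.Str.split?_map filename "."
  have hsep : ("." : String).toList = ['.'] := by decide
  rw [hsep] at h
  unfold PySem.Chars.split? at h
  rw [if_neg (by simp)] at h
  cases hs : PySem.Str.split? filename "." with
  | none => rw [hs] at h; simp at h
  | some L =>
    rw [hs] at h
    simp only [Option.map_some, Option.some.injEq] at h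
    simp only [Option.getD_some]
    rw [splitOn_eq] at h
    have hco : String.ofList ∘ String.toList = id := funext fun s => String.ofList_toList
    rw [← h, List.map_map, hco, List.map_id]

lemma join_ofList (Q : List (List Char)) :
    (PySem.Str.join "." (Q.map String.ofList)).toList = PySem.Chars.join ['.'] Q := by
  rw [PySem.Str.toList_join, List.map_map]
  have hco : (String.toList ∘ String.ofList) = id := funext fun x => String.toList_ofList
  have hsep : ("." : String).toList = ['.'] := by decide
  rw [hco, List.map_id, hsep]

-- ===== VERDICT (by name: the statement is the Claim_ definition above) =====
set_option maxHeartbeats 1000000 in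
theorem extract_htid_spec : Claim_equal_extract_htid := by
  intro filename _
  show pvIdDecode
      ([".meta", ".tokens", ".chars", ".section"].foldl pvTrim
        ([".json", ".parquet"].foldl pvTrim ([".gz", ".bz2"].foldl pvTrim filename)))
    = String.ofList
        ((PySem.Str.join "."
          ((["gz", "bz2", "json", "parquet", "meta", "tokens", "chars", "section"] : List String).foldl
            pvStep ((PySem.Str.split? filename ".").getD []))).toList.map pvTable)
  let W : List (List Char) :=
    [['g','z'], ['b','z','2'], ['j','s','o','n'], ['p','a','r','q','u','e','t'],
     ['m','e','t','a'], ['t','o','k','e','n','s'], ['c','h','a','r','s'],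
     ['s','e','c','t','i','o','n']]
  have hA : (([".gz", ".bz2"] : List String) ++ ([".json", ".parquet"] ++ [".meta", ".tokens", ".chars", ".section"]))
      = W.map (fun w => String.ofList ('.' :: w)) := by decide
  rw [← List.foldl_append, ← List.foldl_append, hA]
  have hfile : filename
      = String.ofList (PySem.Chars.join ['.'] (List.splitOnP (fun c => c == '.') filename.toList)) := by
    rw [join_sp, String.ofList_toList]
  conv_lhs => rw [hfile]
  rw [fold_rel W _ (by decide) (List.splitOnP_ne_nil _ _) (sp_dotfree _)]
  rw [decode_map]
  -- B side
  rw [parts_init]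
  have hwords : (["gz", "bz2", "json", "parquet", "meta", "tokens", "chars", "section"] : List String)
      = W.map String.ofList := by decide
  rw [hwords, foldB_map, join_ofList]
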